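-- pv_equiv track=rewrite | github.com/NandeeshaHK/boxN | boxN.py | nearest_dot_from_pos
-- ===== SOURCE A (Python) =====
-- from typing import Tuple, List, Dict, Set
--
-- ROWS = 4            # number of dot rows (m)
--
-- COLS = 6            # number of dot cols (n)
--
-- CELL_SIZE = 90      # pixel distance between adjacent dots (cell size)
--
-- GRID_PADDING_TOP = 110  # space for header
--
-- MARGIN = 40         # outer margin around grid area
--
-- def dot_to_pixel(dot: Tuple[int,int]) -> Tuple[int,int]:
--     """Map grid dot (r,c) to screen pixel (x,y). Grid is placed left with margin."""
--     r, c = dot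
--     x = MARGIN + c * CELL_SIZE
--     y = GRID_PADDING_TOP + r * CELL_SIZE
--     return x, y
--
-- def nearest_dot_from_pos(pos: Tuple[int,int]) -> Tuple[int,int] or None:
--     mx, my = pos
--     tolerance = CELL_SIZE // 4
--     for r in range(ROWS):
--         for c in range(COLS):
--             x, y = dot_to_pixel((r, c))
--             if (mx - x) ** 2 + (my - y) ** 2 <= tolerance ** 2:
--                 return (r, c)
--     return None
-- ===== SOURCE B (Python) =====
-- ROWS = 4
-- COLS = 6
-- CELL_SIZE = 90
-- GRID_PADDING_TOP = 110
-- MARGIN = 40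
--
-- def dot_to_pixel(dot):
--     r, c = dot
--     return MARGIN + c * CELL_SIZE, GRID_PADDING_TOP + r * CELL_SIZE
--
-- def nearest_dot_from_pos(pos):
--     mx, my = pos
--     tolerance = CELL_SIZE // 4
--     # snap to the nearest grid dot directly (no scan over all dots)
--     c = (mx - MARGIN + CELL_SIZE // 2) // CELL_SIZE
--     r = (my - GRID_PADDING_TOP + CELL_SIZE // 2) // CELL_SIZE
--     x, y = dot_to_pixel((r, c))
--     if 0 <= r < ROWS and 0 <= c < COLS and (mx - x) ** 2 + (my - y) ** 2 <= tolerance ** 2: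
--         return (r, c)
--     return None
-- ===== Notes on version B (the rewrite author's own statement) =====
-- stated objective: faster
-- what changed: Replaces the double loop over all 24 grid dots with a closed-form snap: the candidate row/column are computed by rounding the inverse of dot_to_pixel, then one bounds + squared-distance check decides.
import Mathlib
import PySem

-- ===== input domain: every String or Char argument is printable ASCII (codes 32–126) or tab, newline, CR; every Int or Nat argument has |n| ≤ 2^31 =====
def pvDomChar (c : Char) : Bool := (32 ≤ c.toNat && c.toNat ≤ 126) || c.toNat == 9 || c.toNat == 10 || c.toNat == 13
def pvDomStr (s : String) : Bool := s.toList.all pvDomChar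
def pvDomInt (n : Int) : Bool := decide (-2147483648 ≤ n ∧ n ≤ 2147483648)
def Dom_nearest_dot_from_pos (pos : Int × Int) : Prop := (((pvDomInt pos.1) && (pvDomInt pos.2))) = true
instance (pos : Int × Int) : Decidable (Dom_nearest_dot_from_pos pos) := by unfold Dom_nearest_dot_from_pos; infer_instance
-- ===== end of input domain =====

-- B replaces A's scan over all 24 grid dots by an O(1) closed-form snap to the nearest dot.

-- ===== PORT A =====
def dot_to_pixel (dot : Int × Int) : Int × Int :=
  let r := dot.1
  let c := dot.2
  (40 + c * 90, 110 + r * 90)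

-- inner 'for c in range(COLS)' loop with early return
def nearestLoopC (mx my tolerance r : Int) : List Int → Option (Int × Int)
  | [] => none
  | c :: cs =>
    let p := dot_to_pixel (r, c)
    if (mx - p.1) ^ 2 + (my - p.2) ^ 2 ≤ tolerance ^ 2 then some (r, c)
    else nearestLoopC mx my tolerance r cs

-- outer 'for r in range(ROWS)' loop with early return
def nearestLoopR (mx my tolerance : Int) : List Int → Option (Int × Int)
  | [] => none
  | r :: rs =>
    match nearestLoopC mx my tolerance r (PySem.List.pyRange 0 6 1) with
    | some d => some d
    | none => nearestLoopR mx my tolerance rs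

def nearest_dot_from_pos (pos : Int × Int) : Option (Int × Int) :=
  let mx := pos.1
  let my := pos.2
  let tolerance := PySem.Int.floordiv 90 4
  nearestLoopR mx my tolerance (PySem.List.pyRange 0 4 1)

-- ===== PORT B =====
def nearest_dot_from_pos_alt (pos : Int × Int) : Option (Int × Int) :=
  let mx := pos.1
  let my := pos.2
  let tolerance := PySem.Int.floordiv 90 4
  let c := PySem.Int.floordiv (mx - 40 + PySem.Int.floordiv 90 2) 90
  let r := PySem.Int.floordiv (my - 110 + PySem.Int.floordiv 90 2) 90
  let p := dot_to_pixel (r, c)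
  if 0 ≤ r ∧ r < 4 ∧ 0 ≤ c ∧ c < 6 ∧ (mx - p.1) ^ 2 + (my - p.2) ^ 2 ≤ tolerance ^ 2 then
    some (r, c)
  else none

-- ===== PRECONDITION & SPEC =====
def Spec_nearest_dot_from_pos (pos : Int × Int) (out : Option (Int × Int)) : Prop := out = nearest_dot_from_pos_alt pos
instance (pos : Int × Int) (out : Option (Int × Int)) : Decidable (Spec_nearest_dot_from_pos pos out) := by unfold Spec_nearest_dot_from_pos; infer_instance

-- ===== CLAIM (what is proved, stated in full; the proofs are below) =====
def Claim_equal_nearest_dot_from_pos : Prop := ∀ (pos : Int × Int), Dom_nearest_dot_from_pos pos → Spec_nearest_dot_from_pos pos (nearest_dot_from_pos pos)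

-- ===== LEMMAS AND PROOFS =====

-- the hit condition for dot (r,c), with tolerance² = 22² = 484 evaluated
abbrev hitCond (mx my r c : Int) : Prop :=
  (mx - (40 + c * 90)) ^ 2 + (my - (110 + r * 90)) ^ 2 ≤ 484

lemma sq_bound {a b : Int} (h : a ^ 2 + b ^ 2 ≤ 484) : -22 ≤ a ∧ a ≤ 22 :=
  ⟨by nlinarith [sq_nonneg b], by nlinarith [sq_nonneg b]⟩

lemma fdiv90 {x q : Int} (h1 : 90 * q ≤ x) (h2 : x < 90 * q + 90) :
    PySem.Int.floordiv x 90 = q := by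
  rw [PySem.Int.floordiv_eq_iff_of_pos (by norm_num)]; omega

-- a hit determines both snapped coordinates
lemma hit_determines {mx my r c : Int} (h : hitCond mx my r c) :
    PySem.Int.floordiv (mx + 5) 90 = c ∧ PySem.Int.floordiv (my - 65) 90 = r := by
  unfold hitCond at h
  have hx := sq_bound h
  have hy := sq_bound (by linarith [h] : (my - (110 + r * 90)) ^ 2 + (mx - (40 + c * 90)) ^ 2 ≤ 484)
  exact ⟨fdiv90 (by omega) (by omega), fdiv90 (by omega) (by omega)⟩

lemma loopC_cons (mx my r c : Int) (cs : List Int) :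
    nearestLoopC mx my 22 r (c :: cs) =
      if hitCond mx my r c then some (r, c) else nearestLoopC mx my 22 r cs := by
  simp only [nearestLoopC, dot_to_pixel, hitCond]
  norm_num

lemma loopC_none (mx my r : Int) (cs : List Int)
    (h : ∀ c ∈ cs, ¬ hitCond mx my r c) :
    nearestLoopC mx my 22 r cs = none := by
  induction cs with
  | nil => rfl
  | cons c cs ih =>
    rw [loopC_cons, if_neg (h c (List.mem_cons_self ..))]
    exact ih fun c hc => h c (List.mem_cons_of_mem _ hc)

lemma loopC_found (mx my r c₀ : Int) (cs : List Int)
    (hmem : c₀ ∈ cs) (hhit : hitCond mx my r c₀)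
    (huniq : ∀ c ∈ cs, hitCond mx my r c → c = c₀) :
    nearestLoopC mx my 22 r cs = some (r, c₀) := by
  induction cs with
  | nil => cases hmem
  | cons c cs ih =>
    rw [loopC_cons]
    by_cases hc : hitCond mx my r c
    · have : c = c₀ := huniq c (List.mem_cons_self ..) hc
      subst this
      rw [if_pos hc]
    · rw [if_neg hc]
      rcases List.mem_cons.mp hmem with h | h
      · exact absurd (h ▸ hhit) hc
      · exact ih h fun c hc => huniq c (List.mem_cons_of_mem _ hc)

lemma loopR_none (mx my : Int) (rs : List Int)
    (h : ∀ r ∈ rs, nearestLoopC mx my 22 r (PySem.List.pyRange 0 6 1) = none) :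
    nearestLoopR mx my 22 rs = none := by
  induction rs with
  | nil => rfl
  | cons r rs ih =>
    simp only [nearestLoopR, h r (List.mem_cons_self ..)]
    exact ih fun r hr => h r (List.mem_cons_of_mem _ hr)

lemma loopR_found (mx my r₀ : Int) (d : Int × Int) (rs : List Int)
    (hmem : r₀ ∈ rs)
    (hfound : nearestLoopC mx my 22 r₀ (PySem.List.pyRange 0 6 1) = some d)
    (hothers : ∀ r ∈ rs, r ≠ r₀ → nearestLoopC mx my 22 r (PySem.List.pyRange 0 6 1) = none) :
    nearestLoopR mx my 22 rs = some d := by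
  induction rs with
  | nil => cases hmem
  | cons r rs ih =>
    by_cases hr : r = r₀
    · subst hr; simp only [nearestLoopR, hfound]
    · simp only [nearestLoopR, hothers r (List.mem_cons_self ..) hr]
      rcases List.mem_cons.mp hmem with h | h
      · exact absurd h.symm hr
      · exact ih h fun r hr _ => hothers r (List.mem_cons_of_mem _ hr) ‹_›

lemma tol22 : PySem.Int.floordiv 90 4 = 22 := by decide

lemma half45 : PySem.Int.floordiv 90 2 = 45 := by decide

lemma range4 : PySem.List.pyRange 0 4 1 = [0, 1, 2, 3] := by decide
lemma range6 : PySem.List.pyRange 0 6 1 = [0, 1, 2, 3, 4, 5] := by decide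

-- ===== VERDICT (by name: the statement is the Claim_ definition above) =====
theorem nearest_dot_from_pos_spec : Claim_equal_nearest_dot_from_pos := by
  rintro ⟨mx, my⟩ _
  unfold Spec_nearest_dot_from_pos nearest_dot_from_pos nearest_dot_from_pos_alt
  simp only [tol22, half45]
  set qc := PySem.Int.floordiv (mx - 40 + 45) 90 with hqc
  set qr := PySem.Int.floordiv (my - 110 + 45) 90 with hqr
  have hqc' : qc = PySem.Int.floordiv (mx + 5) 90 := by rw [hqc]; ring_nf
  have hqr' : qr = PySem.Int.floordiv (my - 65) 90 := by rw [hqr]; ring_nf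
  by_cases hguard : 0 ≤ qr ∧ qr < 4 ∧ 0 ≤ qc ∧ qc < 6 ∧
      (mx - (dot_to_pixel (qr, qc)).1) ^ 2 + (my - (dot_to_pixel (qr, qc)).2) ^ 2 ≤ 22 ^ 2
  · rw [if_pos hguard]
    obtain ⟨h1, h2, h3, h4, h5⟩ := hguard
    have hhit : hitCond mx my qr qc := by
      unfold hitCond; simp only [dot_to_pixel] at h5; linarith
    refine loopR_found mx my qr (qr, qc) _ ?_ ?_ ?_
    · rw [range4]; simp only [List.mem_cons, List.not_mem_nil, or_false]; omega
    · refine loopC_found mx my qr qc _ ?_ hhit ?_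
      · rw [range6]; simp only [List.mem_cons, List.not_mem_nil, or_false]; omega
      · intro c _ hc
        have := (hit_determines hc).1
        rw [hqc'] ; exact this.symm
    · intro r _ hr
      refine loopC_none mx my r _ fun c _ hc => ?_
      have := (hit_determines hc).2
      exact hr (by rw [hqr']; exact this.symm)
  · rw [if_neg hguard]
    refine loopR_none mx my _ fun r hrmem => loopC_none mx my r _ fun c hcmem hc => ?_
    have hd := hit_determines hc
    have hrq : qr = r := by rw [hqr']; exact hd.2
    have hcq : qc = c := by rw [hqc']; exact hd.1
    rw [range4] at hrmem; rw [range6] at hcmem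
    simp only [List.mem_cons, List.not_mem_nil, or_false] at hrmem hcmem
    apply hguard
    refine ⟨by omega, by omega, by omega, by omega, ?_⟩
    unfold hitCond at hc
    simp only [dot_to_pixel, hrq, hcq]
    norm_num; linarith
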